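-- pv_equiv track=rewrite | github.com/WMsans/gdworkflow | gdworkflow/merger.py | _find_insert_index
-- ===== SOURCE A (Python) =====
-- def _find_insert_index(lines: list[str], section: str) -> int:
--     section_header = f"[{section}]"
--     existing_sections = []
--     for i, line in enumerate(lines):
--         stripped = line.strip()
--         if stripped.startswith("[") and stripped.endswith("]"):
--             existing_sections.append((i, stripped))
--
--     target = f"[{section}]"
--     for idx, header in existing_sections:
--         if header > target:
--             return idx
--
--     for i in range(len(lines) - 1, -1, -1):
--         if lines[i].strip():
--             return i + 1
--
--     return len(lines)
-- ===== SOURCE B (Python) =====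
-- def _find_insert_index(lines: list[str], section: str) -> int:
--     target = f"[{section}]"
--     header_idx = None
--     last_nonblank = None
--     for i in range(len(lines) - 1, -1, -1):
--         s = lines[i].strip()
--         if s.startswith("[") and s.endswith("]") and s > target:
--             header_idx = i
--         if last_nonblank is None and s:
--             last_nonblank = i
--     if header_idx is not None:
--         return header_idx
--     if last_nonblank is not None:
--         return last_nonblank + 1
--     return len(lines)
-- ===== Notes on version B (the rewrite author's own statement) =====
-- stated objective: alternative
-- what changed: B replaces A's three staged loops (collect headers, scan the collected list, backward fallback scan) with one backward accumulator pass over the indices that maintains two candidates (leftmost later header via overwriting, rightmost non-blank via set-once) and decides at the end, with no early returns and no intermediate list.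
import Mathlib
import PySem

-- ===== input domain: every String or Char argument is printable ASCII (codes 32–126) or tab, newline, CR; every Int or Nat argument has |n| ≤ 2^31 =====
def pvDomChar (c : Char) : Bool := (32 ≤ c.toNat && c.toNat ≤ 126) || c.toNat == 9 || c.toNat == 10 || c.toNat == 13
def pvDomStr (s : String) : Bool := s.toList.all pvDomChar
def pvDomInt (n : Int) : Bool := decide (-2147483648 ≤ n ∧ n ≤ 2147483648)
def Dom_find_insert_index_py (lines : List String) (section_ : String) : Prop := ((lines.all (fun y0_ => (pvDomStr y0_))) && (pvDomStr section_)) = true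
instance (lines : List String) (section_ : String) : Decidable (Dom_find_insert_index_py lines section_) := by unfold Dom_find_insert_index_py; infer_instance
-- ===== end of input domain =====

-- B replaces A's three staged loops by ONE backward accumulator pass (overwrite for the leftmost
-- later header, set-once for the rightmost non-blank line), deciding at the end; objective: alternative.

-- ===== PORT A =====
def find_insert_index_py (lines : List String) (section_ : String) : Int :=
  let _section_header := "[" ++ section_ ++ "]"   -- computed and unused, as in A
  let existing_sections :=
    (PySem.List.enumerate lines).foldl
      (fun acc p =>
        let stripped := PySem.Str.strip p.2
        if PySem.Str.startswith stripped "[" && PySem.Str.endswith stripped "]" then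
          acc ++ [(p.1, stripped)]
        else acc) []
  let target := "[" ++ section_ ++ "]"
  match existing_sections.find? (fun q => decide (target < q.2)) with
  | some q => q.1
  | none =>
    match (PySem.List.pyRange ((lines.length : Int) - 1) (-1) (-1)).find?
        (fun i => !(PySem.Str.strip (PySem.List.pyGetD lines i "") == "")) with
    | some i => i + 1
    | none => (lines.length : Int)

-- ===== PORT B =====
def find_insert_index_py_alt (lines : List String) (section_ : String) : Int :=
  let target := "[" ++ section_ ++ "]"
  let st := (PySem.List.pyRange ((lines.length : Int) - 1) (-1) (-1)).foldl
    (fun (st : Option Int × Option Int) i =>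
      -- s = lines[i].strip() is inlined at its three uses
      ((if PySem.Str.startswith (PySem.Str.strip (PySem.List.pyGetD lines i "")) "[" &&
            PySem.Str.endswith (PySem.Str.strip (PySem.List.pyGetD lines i "")) "]" &&
            decide (target < PySem.Str.strip (PySem.List.pyGetD lines i "")) then some i else st.1),
       (if st.2 == none && !(PySem.Str.strip (PySem.List.pyGetD lines i "") == "") then some i else st.2))) (none, none)
  match st.1 with
  | some i => i
  | none =>
    match st.2 with
    | some j => j + 1
    | none => (lines.length : Int)

-- ===== PRECONDITION & SPEC =====
def Spec_find_insert_index_py (lines : List String) (section_ : String) (out : Int) : Prop := out = find_insert_index_py_alt lines section_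
instance (lines : List String) (section_ : String) (out : Int) : Decidable (Spec_find_insert_index_py lines section_ out) := by unfold Spec_find_insert_index_py; infer_instance

-- ===== CLAIM =====
def Claim_equal_find_insert_index_py : Prop := ∀ (lines : List String) (section_ : String), Dom_find_insert_index_py lines section_ → Spec_find_insert_index_py lines section_ (find_insert_index_py lines section_)

-- ===== LEMMAS AND PROOFS =====

-- folding the two accumulators over a reversed pair list: the overwrite slot ends at the FIRST
-- forward match, the set-once slot at the FIRST backward match
theorem pvFoldRev_eq {α : Type} (c d : α → Bool) (l : List (Int × α)) :
    l.reverse.foldl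
      (fun (st : Option Int × Option Int) p =>
        ((if c p.2 then some p.1 else st.1),
         (if st.2 == none && d p.2 then some p.1 else st.2))) (none, none)
    = ((l.find? (fun p => c p.2)).map Prod.fst,
       (l.reverse.find? (fun p => d p.2)).map Prod.fst) := by
  induction l with
  | nil => rfl
  | cons x t ih =>
    simp only [List.reverse_cons, List.foldl_append, List.foldl_cons, List.foldl_nil, ih,
      List.find?_cons, List.find?_append]
    cases hc : c x.2 <;> cases hd : d x.2 <;>
      cases hft : t.find? (fun p => c p.2) <;> cases hfd : t.reverse.find? (fun p => d p.2) <;>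
        simp_all [Option.or]

-- B's backward index fold, read off against A's two searches
theorem pvBridge (c d : String → Bool) (xs : List String) :
    (PySem.List.pyRange ((xs.length : Int) - 1) (-1) (-1)).foldl
      (fun (st : Option Int × Option Int) i =>
        ((if c (PySem.List.pyGetD xs i "") then some i else st.1),
         (if st.2 == none && d (PySem.List.pyGetD xs i "") then some i else st.2))) (none, none)
    = (((PySem.List.enumerate xs).find? (fun p => c p.2)).map Prod.fst,
       (PySem.List.pyRange ((xs.length : Int) - 1) (-1) (-1)).find?
         (fun i => d (PySem.List.pyGetD xs i ""))) := by
  have hr : PySem.List.pyRange ((xs.length : Int) - 1) (-1) (-1)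
      = (PySem.List.pyRange 0 (xs.length : Int) 1).reverse := by
    rw [PySem.List.pyRange_neg_one_eq_reverse]
    norm_num
  have he : PySem.List.enumerate xs
      = (PySem.List.pyRange 0 (xs.length : Int) 1).map
          (fun j => (j, PySem.List.pyGetD xs j "")) := by
    have h := PySem.List.enumerate_eq_map_pyRange (xs := xs) (d := "")
    simpa using h
  rw [hr, he]
  rw [show (fun (st : Option Int × Option Int) i =>
        ((if c (PySem.List.pyGetD xs i "") then some i else st.1),
         (if st.2 == none && d (PySem.List.pyGetD xs i "") then some i else st.2)))
      = (fun (st : Option Int × Option Int) i =>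
        (fun (st : Option Int × Option Int) (p : Int × String) =>
          ((if c p.2 then some p.1 else st.1),
           (if st.2 == none && d p.2 then some p.1 else st.2))) st
          ((fun j => (j, PySem.List.pyGetD xs j "")) i)) from rfl,
    ← List.foldl_map (f := fun j => ((j : Int), PySem.List.pyGetD xs j ""))
      (g := fun (st : Option Int × Option Int) (p : Int × String) =>
        ((if c p.2 then some p.1 else st.1),
         (if st.2 == none && d p.2 then some p.1 else st.2))),
    List.map_reverse, pvFoldRev_eq]
  congr 1
  rw [← List.map_reverse, List.find?_map, Option.map_map]
  simp [Function.comp_def]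

-- ===== VERDICT =====
theorem find_insert_index_py_spec : Claim_equal_find_insert_index_py := by
  intro lines section_ _hdom
  unfold Spec_find_insert_index_py find_insert_index_py find_insert_index_py_alt
  simp only [pvBridge
      (fun t => PySem.Str.startswith (PySem.Str.strip t) "[" &&
        PySem.Str.endswith (PySem.Str.strip t) "]" &&
        decide ("[" ++ section_ ++ "]" < PySem.Str.strip t))
      (fun t => !(PySem.Str.strip t == "")) lines,
    PySem.List.foldl_append_if
      (fun p : Int × String => PySem.Str.startswith (PySem.Str.strip p.2) "[" &&
        PySem.Str.endswith (PySem.Str.strip p.2) "]")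
      (fun p : Int × String => (p.1, PySem.Str.strip p.2)),
    List.nil_append, List.find?_map, List.find?_filter, Function.comp_apply]
  simp only [Bool.decide_and, Bool.decide_coe, Bool.and_assoc]
  cases (PySem.List.enumerate lines).find? (fun p =>
      PySem.Str.startswith (PySem.Str.strip p.2) "[" &&
      (PySem.Str.endswith (PySem.Str.strip p.2) "]" &&
      decide ("[" ++ section_ ++ "]" < PySem.Str.strip p.2))) <;> rfl
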